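-- pv_equiv track=rewrite | github.com/khanhduong95/Open-Tux-World | scripts/switch_item.py | check_item_next
-- ===== SOURCE A (Python) =====
-- def check_item_next(own, item_number):
--     if item_number == 0 or item_number > 2:
--         return 0
--     elif item_number == 1:
--         if own["snow"] > 0:
--             return 1
--         else:
--             return check_item_next(own, 2)
--     else:
--         if own["ice"] > 0:
--             return 2
--         else:
--             return 0
-- ===== SOURCE B (Python) =====
-- ITEMS = ("snow", "ice")
--
-- def check_item_next(own, item_number):
--     if item_number == 0 or item_number > 2:
--         return 0
--     start = 0 if item_number == 1 else 1
--     for idx in range(start, 2):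
--         if own[ITEMS[idx]] > 0:
--             return idx + 1
--     return 0
-- ===== Notes on version B (the rewrite author's own statement) =====
-- stated objective: alternative
-- what changed: Replaces the tail-recursive if/elif chain with a single linear scan over an ordered item table, starting at the index determined by item_number; Pre_ excludes only the inputs where both programs raise KeyError.
import Mathlib
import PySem

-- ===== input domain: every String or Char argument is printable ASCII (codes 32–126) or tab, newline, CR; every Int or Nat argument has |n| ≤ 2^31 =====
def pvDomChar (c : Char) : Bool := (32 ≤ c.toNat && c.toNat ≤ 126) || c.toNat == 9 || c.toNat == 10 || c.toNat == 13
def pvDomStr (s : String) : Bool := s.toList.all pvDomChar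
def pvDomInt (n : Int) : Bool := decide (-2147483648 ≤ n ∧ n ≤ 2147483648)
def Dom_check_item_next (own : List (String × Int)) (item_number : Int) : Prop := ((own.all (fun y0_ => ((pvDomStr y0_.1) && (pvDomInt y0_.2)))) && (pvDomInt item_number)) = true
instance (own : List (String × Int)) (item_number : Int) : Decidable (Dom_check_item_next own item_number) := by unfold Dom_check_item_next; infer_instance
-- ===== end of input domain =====

-- B replaces the tail-recursive if/elif chain with one linear scan over an ordered item table.

-- ===== PORT A =====
-- own[k] (first match in the association list; KeyError = none, excluded by Pre_)
def pvOwnGet (own : List (String × Int)) (k : String) : Option Int := own.lookup k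

def check_item_next (own : List (String × Int)) (item_number : Int) : Int :=
  if item_number = 0 ∨ item_number > 2 then 0
  else if h : item_number = 1 then
    if (pvOwnGet own "snow").getD 0 > 0 then 1
    else check_item_next own 2
  else
    if (pvOwnGet own "ice").getD 0 > 0 then 2 else 0
termination_by (if item_number = 1 then 1 else 0 : Nat)
decreasing_by simp [h]

-- ===== PORT B =====
def pvItems : List String := ["snow", "ice"]

-- the for-loop with early return over the remaining indices
def pvScan (own : List (String × Int)) : List Int → Int
  | [] => 0
  | idx :: rest =>
      if (pvOwnGet own ((PySem.List.pyGet? pvItems idx).getD "")).getD 0 > 0 then idx + 1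
      else pvScan own rest

def check_item_next_alt (own : List (String × Int)) (item_number : Int) : Int :=
  if item_number = 0 ∨ item_number > 2 then 0
  else
    let start : Int := if item_number = 1 then 0 else 1
    pvScan own (PySem.List.pyRange start 2 1)

-- ===== PRECONDITION & SPEC =====
-- Pre_ excludes exactly the inputs where Python A raises KeyError: "snow" missing when
-- item_number = 1, or "ice" missing when it is consulted (B raises there too).
def Pre_check_item_next (own : List (String × Int)) (item_number : Int) : Prop :=
  (item_number = 1 →
    (pvOwnGet own "snow").isSome ∧ ((pvOwnGet own "snow").getD 0 ≤ 0 → (pvOwnGet own "ice").isSome))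
  ∧ (¬(item_number = 0 ∨ item_number > 2) → item_number ≠ 1 → (pvOwnGet own "ice").isSome)
instance (own : List (String × Int)) (item_number : Int) : Decidable (Pre_check_item_next own item_number) := by unfold Pre_check_item_next; infer_instance

def pvWitness_check_item_next : (List (String × Int)) × Int := ([("snow", 0), ("ice", 3)], 1)

def Spec_check_item_next (own : List (String × Int)) (item_number : Int) (out : Int) : Prop := out = check_item_next_alt own item_number
instance (own : List (String × Int)) (item_number : Int) (out : Int) : Decidable (Spec_check_item_next own item_number out) := by unfold Spec_check_item_next; infer_instance

-- ===== CLAIM (what is proved, stated in full; the proofs are below) =====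
def Claim_equal_check_item_next : Prop := ∀ (own : List (String × Int)) (item_number : Int), Dom_check_item_next own item_number → Pre_check_item_next own item_number → Spec_check_item_next own item_number (check_item_next own item_number)

-- ===== LEMMAS AND PROOFS =====
theorem pyRange_02 : PySem.List.pyRange 0 2 1 = [0, 1] := by decide
theorem pyRange_12 : PySem.List.pyRange 1 2 1 = [1] := by decide

-- ===== VERDICT (by name: the statement is the Claim_ definition above) =====
theorem check_item_next_spec : Claim_equal_check_item_next := by
  intro own n _ _
  unfold Spec_check_item_next check_item_next_alt
  by_cases h0 : n = 0 ∨ n > 2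
  · rw [check_item_next]
    simp [h0]
  · by_cases h1 : n = 1
    · rw [check_item_next]
      simp only [h1, dif_pos, if_pos, pyRange_02]
      rw [pvScan, pvScan, pvScan]
      rw [check_item_next]
      simp [PySem.List.pyGet?, PySem.List.pyIdx?, pvItems]
    · rw [check_item_next]
      simp only [h0, if_false, h1, pyRange_12]
      rw [pvScan, pvScan]
      simp [PySem.List.pyGet?, PySem.List.pyIdx?, pvItems]
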